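-- pv_equiv track=rewrite | github.com/niamoto/niamoto | src/niamoto/gui/api/routers/stats.py | _find_geometry_column
-- ===== SOURCE A (Python) =====
-- from typing import Any, Dict, List, Optional, Tuple
--
-- def _find_geometry_column(
--     columns_info: List[Dict[str, Any]],
-- ) -> Tuple[Optional[str], bool]:
--     """Detect geometry column and whether it's native GEOMETRY/BYTEA."""
--     native_patterns = ["_geom", "geometry", "the_geom", "wkb_geometry"]
--     wkt_patterns = ["geo_pt", "geo", "geom", "location", "wkt"]
--
--     wkt_candidate = None
--     for col in columns_info:
--         col_name = col["name"].lower()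
--         col_type = str(col.get("type", "")).upper()
--
--         if "GEOMETRY" in col_type or "BYTEA" in col_type:
--             if any(col_name.endswith(p) or col_name == p for p in native_patterns):
--                 return col["name"], True
--         elif wkt_candidate is None and any(p in col_name for p in wkt_patterns):
--             wkt_candidate = col["name"]
--
--     return wkt_candidate, False
-- ===== SOURCE B (Python) =====
-- def _is_native_type(typ):
--     return "GEOMETRY" in typ or "BYTEA" in typ
--
-- def _find_geometry_column(columns_info):
--     """Detect geometry column and whether it's native GEOMETRY/BYTEA."""
--     native_patterns = ["_geom", "geometry", "the_geom", "wkb_geometry"]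
--     wkt_patterns = ["geo_pt", "geo", "geom", "location", "wkt"]
--
--     # Pass 1: first native-typed column whose name matches a native pattern.
--     for col in columns_info:
--         name = col["name"].lower()
--         typ = str(col.get("type", "")).upper()
--         if _is_native_type(typ) and any(
--             name.endswith(p) or name == p for p in native_patterns
--         ):
--             return col["name"], True
--
--     # Pass 2: first non-native-typed column whose name contains a WKT pattern.
--     for col in columns_info:
--         name = col["name"].lower()
--         typ = str(col.get("type", "")).upper()
--         if not _is_native_type(typ) and any(p in name for p in wkt_patterns):
--             return col["name"], False
--
--     return None, False
-- ===== Notes on version B (the rewrite author's own statement) =====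
-- stated objective: alternative
-- what changed: Replaced the single interleaved loop carrying a wkt_candidate accumulator by two sequential passes: pass 1 returns the first native-typed column matching a native name pattern, pass 2 the first non-native-typed column containing a WKT pattern.
import Mathlib
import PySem

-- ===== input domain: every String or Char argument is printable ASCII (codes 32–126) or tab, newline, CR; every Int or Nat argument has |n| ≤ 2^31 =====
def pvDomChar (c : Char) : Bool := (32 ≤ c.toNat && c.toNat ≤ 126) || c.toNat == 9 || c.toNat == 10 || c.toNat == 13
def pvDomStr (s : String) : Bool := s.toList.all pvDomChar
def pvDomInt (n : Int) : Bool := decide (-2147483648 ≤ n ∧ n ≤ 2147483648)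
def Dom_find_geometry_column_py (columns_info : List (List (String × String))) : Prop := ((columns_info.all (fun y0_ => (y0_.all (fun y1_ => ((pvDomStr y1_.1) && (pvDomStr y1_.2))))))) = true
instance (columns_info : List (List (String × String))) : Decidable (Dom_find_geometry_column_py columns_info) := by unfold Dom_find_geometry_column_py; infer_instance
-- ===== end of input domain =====

-- B replaces A's single loop with a wkt_candidate accumulator by two sequential passes
-- (first native match, else first non-native WKT-named column); equivalence of return values is proved.

-- ===== PORT A =====
-- one column's native/WKT tests, shared vocabulary (each port transliterates its own loop shape)
def pvNativeType (col_type : String) : Bool :=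
  PySem.Str.isIn "GEOMETRY" col_type || PySem.Str.isIn "BYTEA" col_type

def pvNativeName (col_name : String) : Bool :=
  (["_geom", "geometry", "the_geom", "wkb_geometry"]).any
    (fun p => PySem.Str.endswith col_name p || col_name == p)

def pvWktName (col_name : String) : Bool :=
  (["geo_pt", "geo", "geom", "location", "wkt"]).any
    (fun p => PySem.Str.isIn p col_name)

-- A's loop: wkt_candidate threaded through; col["name"] raises KeyError when absent
-- (Pre_ excludes that; the port reads the default "" there).
def goA (wkt_candidate : Option String) : List (List (String × String)) → Option String × Bool
  | [] => (wkt_candidate, false)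
  | col :: rest =>
    let d := PySem.Dict.ofList col
    let col_name := PySem.Str.lower (d.getD "name" "")
    let col_type := PySem.Str.upper (d.getD "type" "")
    if pvNativeType col_type then
      if pvNativeName col_name then (some (d.getD "name" ""), true)
      else goA wkt_candidate rest
    else if wkt_candidate == none && pvWktName col_name then
      goA (some (d.getD "name" "")) rest
    else goA wkt_candidate rest

def find_geometry_column_py (columns_info : List (List (String × String))) : Option String × Bool :=
  goA none columns_info

-- ===== PORT B =====
-- pass 1: first native-typed column whose name matches a native pattern
def pass1 : List (List (String × String)) → Option String
  | [] => none
  | col :: rest =>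
    let d := PySem.Dict.ofList col
    let name := PySem.Str.lower (d.getD "name" "")
    let typ := PySem.Str.upper (d.getD "type" "")
    if pvNativeType typ && pvNativeName name then some (d.getD "name" "")
    else pass1 rest

-- pass 2: first non-native-typed column whose name contains a WKT pattern
def pass2 : List (List (String × String)) → Option String
  | [] => none
  | col :: rest =>
    let d := PySem.Dict.ofList col
    let name := PySem.Str.lower (d.getD "name" "")
    let typ := PySem.Str.upper (d.getD "type" "")
    if !pvNativeType typ && pvWktName name then
      some (d.getD "name" "")
    else pass2 rest

def find_geometry_column_py_alt (columns_info : List (List (String × String))) : Option String × Bool :=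
  match pass1 columns_info with
  | some n => (some n, true)
  | none =>
    match pass2 columns_info with
    | some n => (some n, false)
    | none => (none, false)

-- ===== PRECONDITION & SPEC =====
-- a column whose dict raises no KeyError on col["name"] and is a native hit (type and name both match)
def pvNativeHit (col : List (String × String)) : Bool :=
  match (PySem.Dict.ofList col).get? "name" with
  | none => false
  | some n =>
    pvNativeType (PySem.Str.upper ((PySem.Dict.ofList col).getD "type" "")) &&
    pvNativeName (PySem.Str.lower n)

-- A raises KeyError on col["name"] when it reaches a column without a "name" key, i.e. when some
-- column lacking "name" is not preceded by a native hit (on which A would already have returned).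
def Pre_find_geometry_column_py (columns_info : List (List (String × String))) : Prop :=
  ∀ i (h : i < columns_info.length),
    (PySem.Dict.ofList columns_info[i]).get? "name" = none →
    (columns_info.take i).any pvNativeHit = true

instance (columns_info : List (List (String × String))) : Decidable (Pre_find_geometry_column_py columns_info) := by
  unfold Pre_find_geometry_column_py; infer_instance

def pvWitness_find_geometry_column_py : (List (List (String × String))) :=
  [[("name", "the_geom"), ("type", "GEOMETRY")], [("name", "geo_pt"), ("type", "TEXT")]]

def Spec_find_geometry_column_py (columns_info : List (List (String × String))) (out : Option String × Bool) : Prop := out = find_geometry_column_py_alt columns_info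
instance (columns_info : List (List (String × String))) (out : Option String × Bool) : Decidable (Spec_find_geometry_column_py columns_info out) := by unfold Spec_find_geometry_column_py; infer_instance

-- ===== CLAIM (what is proved, stated in full; the proofs are below) =====
def Claim_equal_find_geometry_column_py : Prop := ∀ (columns_info : List (List (String × String))), Dom_find_geometry_column_py columns_info → Pre_find_geometry_column_py columns_info → Spec_find_geometry_column_py columns_info (find_geometry_column_py columns_info)

-- ===== LEMMAS AND PROOFS =====

-- A's loop equals: first native match if any, else the carried candidate, else pass 2.
lemma goA_eq (cols : List (List (String × String))) :
    ∀ w, goA w cols =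
      match pass1 cols with
      | some n => (some n, true)
      | none =>
        match w with
        | some x => (some x, false)
        | none => (pass2 cols, false) := by
  induction cols with
  | nil => intro w; cases w <;> rfl
  | cons col rest ih =>
    intro w
    by_cases hn : pvNativeType (PySem.Str.upper ((PySem.Dict.ofList col).getD "type" "")) = true
    · by_cases hm : pvNativeName (PySem.Str.lower ((PySem.Dict.ofList col).getD "name" "")) = true
      · simp [goA, pass1, hn, hm]
      · simp [goA, pass1, pass2, hn, hm, ih w]
    · have hn' : pvNativeType (PySem.Str.upper ((PySem.Dict.ofList col).getD "type" "")) = false := by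
        simpa using hn
      by_cases hw : pvWktName (PySem.Str.lower ((PySem.Dict.ofList col).getD "name" "")) = true
      · cases w with
        | none => simp [goA, pass1, pass2, hn', hw, ih]
        | some x => simp [goA, pass1, hn', hw, ih]
      · cases w with
        | none => simp [goA, pass1, pass2, hn', hw, ih]
        | some x => simp [goA, pass1, hn', hw, ih]

-- ===== VERDICT (by name: the statement is the Claim_ definition above) =====
theorem find_geometry_column_py_spec : Claim_equal_find_geometry_column_py := by
  intro cols _ _
  unfold Spec_find_geometry_column_py find_geometry_column_py find_geometry_column_py_alt
  rw [goA_eq cols none]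
  cases h1 : pass1 cols <;> cases h2 : pass2 cols <;> simp
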